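-- pv_equiv track=rewrite | github.com/nihal-dcunha/mockai-localfaq | agent.py | parse_faq
-- ===== SOURCE A (Python) =====
-- def parse_faq(md_text):
--     qas = {}
--     lines = md_text.split("\n")
--     current_q = None
--     current_a = []
--
--     # Process each line
--     for line in lines:
--         if line.startswith("## "):  # New question
--             if current_q:   # Save previous Q/A if exists
--                 qas[current_q] = "\n".join(current_a).strip()
--             current_q = line.replace("## ", "").strip() # Remove ## prefix
--             current_a = []  # reset answer
--         else:
--             if current_q:
--                 current_a.append(line)
--
--     # Save last question-answer pair
--     if current_q:
--         qas[current_q] = "\n".join(current_a).strip()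
--
--     return qas
-- ===== SOURCE B (Python) =====
-- def parse_faq(md_text):
--     lines = md_text.split("\n")
--     n = len(lines)
--     qas = {}
--     # skip the preamble before the first "## " header
--     i = 0
--     while i < n and not lines[i].startswith("## "):
--         i += 1
--     # each header owns the block of lines up to the next header
--     while i < n:
--         q = lines[i].replace("## ", "").strip()
--         j = i + 1
--         while j < n and not lines[j].startswith("## "):
--             j += 1
--         if q:
--             qas[q] = "\n".join(lines[i + 1:j]).strip()
--         i = j
--     return qas
-- ===== Notes on version B (the rewrite author's own statement) =====
-- stated objective: alternative
-- what changed: Replaces A's stateful line-by-line scan (current question + growing answer accumulator, save-on-next-header plus a trailing save) with an index-based pass that jumps from header to header and slices each answer block out of the line list in one go.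
import Mathlib
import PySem

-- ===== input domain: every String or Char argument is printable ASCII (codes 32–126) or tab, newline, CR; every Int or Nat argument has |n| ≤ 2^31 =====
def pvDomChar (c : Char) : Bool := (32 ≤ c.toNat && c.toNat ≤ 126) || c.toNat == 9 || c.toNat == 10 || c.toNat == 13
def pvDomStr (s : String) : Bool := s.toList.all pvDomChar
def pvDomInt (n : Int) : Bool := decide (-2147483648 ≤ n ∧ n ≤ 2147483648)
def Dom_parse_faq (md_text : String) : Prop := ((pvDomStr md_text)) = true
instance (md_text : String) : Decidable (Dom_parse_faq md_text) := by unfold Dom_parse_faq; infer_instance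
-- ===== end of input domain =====

-- B parses by locating the header positions and slicing each answer block out in one go,
-- instead of A's stateful line-by-line scan; objective: alternative decomposition (same cost).

-- shared per-line primitives (the identical Python expressions occur in A and in B)
def pvIsHeader (line : String) : Bool := PySem.Str.startswith line "## "
def pvQ (line : String) : String := PySem.Str.strip (PySem.Str.replace line "## " "")
def pvJoinStrip (ls : List String) : String := PySem.Str.strip (PySem.Str.join "\n" ls)

-- ===== PORT A =====
-- Python truthiness of current_q (None or a string)
def pvTruthy : Option String → Bool
  | none => false
  | some s => !(s == "")

-- 'if current_q: qas[current_q] = "\n".join(current_a).strip()'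
def pvSave (qas : PySem.Dict String String) (cq : Option String) (ca : List String) :
    PySem.Dict String String :=
  match cq with
  | some q => if q == "" then qas else qas.insert q (pvJoinStrip ca)
  | none => qas

-- the body of A's 'for line in lines' loop
def pvStep (st : PySem.Dict String String × Option String × List String) (line : String) :
    PySem.Dict String String × Option String × List String :=
  if pvIsHeader line then
    (pvSave st.1 st.2.1 st.2.2, some (pvQ line), [])
  else
    if pvTruthy st.2.1 then (st.1, st.2.1, st.2.2 ++ [line]) else st

def parse_faq (md_text : String) : List (String × String) :=
  let lines := (PySem.Str.split? md_text "\n").getD []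
  let st := lines.foldl pvStep ((PySem.Dict.empty : PySem.Dict String String), none, [])
  (pvSave st.1 st.2.1 st.2.2).items

-- ===== PORT B =====
-- 'while i < n and not lines[i].startswith("## "): i += 1' (first header index ≥ i, or n)
def pvFindHeader (lines : List String) (i : Nat) : Nat :=
  if h : i < lines.length then
    if pvIsHeader lines[i] then i else pvFindHeader lines (i + 1)
  else i
termination_by lines.length - i

-- needed by pvBuild's termination proof
theorem pvFindHeader_ge (lines : List String) (i : Nat) : i ≤ pvFindHeader lines i := by
  fun_induction pvFindHeader with
  | case1 => omega
  | case2 i h hh ih => omega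
  | case3 => omega

-- B's main 'while i < n' loop; i is a header index (or n)
def pvBuild (lines : List String) (i : Nat) (qas : PySem.Dict String String) :
    PySem.Dict String String :=
  if h : i < lines.length then
    let q := pvQ lines[i]
    let j := pvFindHeader lines (i + 1)
    pvBuild lines j
      (if q == "" then qas
       else qas.insert q
         (pvJoinStrip (PySem.List.slice lines (some ((i + 1 : Nat) : Int)) (some ((j : Nat) : Int)))))
  else qas
termination_by lines.length - i
decreasing_by have := pvFindHeader_ge lines (i + 1); omega

def parse_faq_alt (md_text : String) : List (String × String) :=
  let lines := (PySem.Str.split? md_text "\n").getD []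
  (pvBuild lines (pvFindHeader lines 0) (PySem.Dict.empty : PySem.Dict String String)).items

-- ===== PRECONDITION & SPEC =====
def Spec_parse_faq (md_text : String) (out : List (String × String)) : Prop := out = parse_faq_alt md_text
instance (md_text : String) (out : List (String × String)) : Decidable (Spec_parse_faq md_text out) := by unfold Spec_parse_faq; infer_instance

-- ===== CLAIM (what is proved, stated in full; the proofs are below) =====
def Claim_equal_parse_faq : Prop := ∀ (md_text : String), Dom_parse_faq md_text → Spec_parse_faq md_text (parse_faq md_text)

-- ===== LEMMAS AND PROOFS =====

-- common form both programs reduce to: consume the header chunks of the line list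
def pvChunks : List String → PySem.Dict String String → PySem.Dict String String
  | [], d => d
  | l :: rest, d =>
    if pvIsHeader l then
      pvChunks (rest.dropWhile (fun x => !pvIsHeader x))
        (if pvQ l == "" then d
         else d.insert (pvQ l) (pvJoinStrip (rest.takeWhile (fun x => !pvIsHeader x))))
    else pvChunks rest d
termination_by ls => ls.length
decreasing_by
  · have := List.length_dropWhile_le (fun x => !pvIsHeader x) rest; simp; omega
  · simp

theorem pv_take_len_takeWhile {α : Type} (p : α → Bool) (l : List α) :
    l.take (l.takeWhile p).length = l.takeWhile p := by
  induction l with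
  | nil => simp
  | cons x xs ih => by_cases h : p x <;> simp [h, ih]

theorem pv_drop_len_takeWhile {α : Type} (p : α → Bool) (l : List α) :
    l.drop (l.takeWhile p).length = l.dropWhile p := by
  induction l with
  | nil => simp
  | cons x xs ih => by_cases h : p x <;> simp [h, ih]

-- A's loop, started just after a header with question q and accumulator ca
theorem pvA2 (rest : List String) : ∀ (d : PySem.Dict String String) (q : String) (ca : List String),
    (let st := rest.foldl pvStep (d, some q, ca); pvSave st.1 st.2.1 st.2.2)
      = pvChunks (rest.dropWhile (fun x => !pvIsHeader x))
          (if q == "" then d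
           else d.insert q (pvJoinStrip (ca ++ rest.takeWhile (fun x => !pvIsHeader x)))) := by
  induction rest with
  | nil => intro d q ca; simp [pvSave, pvChunks]
  | cons x xs ih =>
    intro d q ca
    by_cases hx : pvIsHeader x
    · have hstep : pvStep (d, some q, ca) x = (pvSave d (some q) ca, some (pvQ x), []) := by
        simp [pvStep, hx]
      simp only [List.foldl_cons, hstep, ih]
      simp only [List.dropWhile_cons, List.takeWhile_cons, hx, Bool.not_true, Bool.false_eq_true,
        ite_false]
      rw [pvChunks]
      simp only [hx, if_pos, List.nil_append]
      simp [pvSave]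
    · by_cases hq : q == ""
      · have hstep : pvStep (d, some q, ca) x = (d, some q, ca) := by
          simp only [pvStep, hx, Bool.false_eq_true, ite_false, pvTruthy]
          simp [hq]
        simp only [List.foldl_cons, hstep, ih]
        simp [hx, hq]
      · have hstep : pvStep (d, some q, ca) x = (d, some q, ca ++ [x]) := by
          simp only [pvStep, hx, Bool.false_eq_true, ite_false, pvTruthy]
          simp [hq]
        simp only [List.foldl_cons, hstep, ih]
        simp [hx, hq]

-- A's whole run equals pvChunks
theorem pvAbridge (lines : List String) : ∀ (d : PySem.Dict String String),
    (let st := lines.foldl pvStep (d, none, ([] : List String)); pvSave st.1 st.2.1 st.2.2)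
      = pvChunks lines d := by
  induction lines with
  | nil => intro d; simp [pvSave, pvChunks]
  | cons l rest ih =>
    intro d
    by_cases hl : pvIsHeader l
    · have hstep : pvStep (d, none, ([] : List String)) l = (d, some (pvQ l), []) := by
        simp [pvStep, hl, pvSave]
      simp only [List.foldl_cons, hstep, pvA2]
      rw [pvChunks]
      simp [hl]
    · have hstep : pvStep (d, none, ([] : List String)) l = (d, none, []) := by
        simp [pvStep, hl, pvTruthy]
      simp only [List.foldl_cons, hstep, ih]
      rw [pvChunks]
      simp [hl]

theorem pvFindHeader_eq (lines : List String) : ∀ (i : Nat), i ≤ lines.length →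
    pvFindHeader lines i = i + ((lines.drop i).takeWhile (fun x => !pvIsHeader x)).length := by
  intro i
  fun_induction pvFindHeader with
  | case1 i h hh =>
    intro _
    rw [List.drop_eq_getElem_cons h, List.takeWhile_cons]
    simp [hh]
  | case2 i h hh ih =>
    intro _
    rw [List.drop_eq_getElem_cons h, List.takeWhile_cons]
    simp only [hh, Bool.not_false, ite_true, List.length_cons]
    rw [ih (by omega)]
    omega
  | case3 i h =>
    intro hle
    have : i = lines.length := by omega
    simp [this, List.drop_length]

theorem pvFindHeader_le (lines : List String) (i : Nat) (h : i ≤ lines.length) :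
    pvFindHeader lines i ≤ lines.length := by
  rw [pvFindHeader_eq lines i h]
  have := (List.takeWhile_prefix (l := lines.drop i) (p := fun x => !pvIsHeader x)).length_le
  simp only [List.length_drop] at this
  omega

theorem pvFindHeader_inv (lines : List String) : ∀ (i : Nat), i ≤ lines.length →
    pvFindHeader lines i = lines.length ∨
      ∃ h : pvFindHeader lines i < lines.length, pvIsHeader lines[pvFindHeader lines i] := by
  intro i
  fun_induction pvFindHeader with
  | case1 i h hh => intro _; exact Or.inr ⟨h, hh⟩
  | case2 i h hh ih => intro _; exact ih (by omega)
  | case3 i h => intro hle; exact Or.inl (by omega)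

-- B's loop equals pvChunks from any header position
theorem pvBbridge (lines : List String) : ∀ (k i : Nat) (d : PySem.Dict String String),
    lines.length - i = k → i ≤ lines.length →
    (i = lines.length ∨ ∃ h : i < lines.length, pvIsHeader lines[i]) →
    pvBuild lines i d = pvChunks (lines.drop i) d := by
  intro k
  induction k using Nat.strong_induction_on with
  | _ k ih =>
    intro i d hk hin hinv
    rcases hinv with h | ⟨hlt, hhd⟩
    · subst h
      rw [pvBuild]
      simp [List.drop_length, pvChunks]
    · rw [pvBuild]
      simp only [dif_pos hlt]
      have hi1 : i + 1 ≤ lines.length := hlt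
      have hje := pvFindHeader_eq lines (i + 1) hi1
      have hjle := pvFindHeader_le lines (i + 1) hi1
      have hjinv := pvFindHeader_inv lines (i + 1) hi1
      have hdropj : lines.drop (pvFindHeader lines (i + 1))
          = (lines.drop (i + 1)).dropWhile (fun x => !pvIsHeader x) := by
        rw [hje, ← pv_drop_len_takeWhile (fun x => !pvIsHeader x) (lines.drop (i + 1)),
          List.drop_drop]
      have hslice : PySem.List.slice lines (some ((i + 1 : Nat) : Int)) (some ((pvFindHeader lines (i + 1) : Nat) : Int))
          = (lines.drop (i + 1)).takeWhile (fun x => !pvIsHeader x) := by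
        rw [PySem.List.slice_natCast, hje]
        simp only [Nat.add_sub_cancel_left]
        exact pv_take_len_takeWhile _ _
      rw [List.drop_eq_getElem_cons hlt, pvChunks]
      simp only [hhd, ite_true]
      rw [← hdropj, hslice]
      exact ih (lines.length - pvFindHeader lines (i + 1))
        (by have := pvFindHeader_ge lines (i + 1); omega)
        (pvFindHeader lines (i + 1)) _ rfl hjle hjinv

theorem pvChunks_dropWhile (lines : List String) : ∀ (d : PySem.Dict String String),
    pvChunks (lines.dropWhile (fun x => !pvIsHeader x)) d = pvChunks lines d := by
  induction lines with
  | nil => intro d; simp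
  | cons l rest ih =>
    intro d
    by_cases hl : pvIsHeader l
    · simp [hl]
    · rw [List.dropWhile_cons]
      simp only [hl, Bool.not_false, ite_true]
      rw [ih, pvChunks]
      simp [hl]

-- ===== VERDICT (by name: the statement is the Claim_ definition above) =====
theorem pvMain (lines : List String) :
    (pvSave (lines.foldl pvStep ((PySem.Dict.empty : PySem.Dict String String), none, [])).1
        (lines.foldl pvStep ((PySem.Dict.empty : PySem.Dict String String), none, [])).2.1
        (lines.foldl pvStep ((PySem.Dict.empty : PySem.Dict String String), none, [])).2.2).items
      = (pvBuild lines (pvFindHeader lines 0) (PySem.Dict.empty : PySem.Dict String String)).items := by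
  have hA := pvAbridge lines (PySem.Dict.empty : PySem.Dict String String)
  simp only at hA
  rw [hA]
  have h0 : (0 : Nat) ≤ lines.length := Nat.zero_le _
  rw [pvBbridge lines (lines.length - pvFindHeader lines 0) (pvFindHeader lines 0) _ rfl
      (pvFindHeader_le _ 0 h0) (pvFindHeader_inv _ 0 h0)]
  have hje := pvFindHeader_eq lines 0 h0
  simp only [List.drop_zero, Nat.zero_add] at hje
  rw [hje, pv_drop_len_takeWhile, pvChunks_dropWhile]

theorem parse_faq_spec : Claim_equal_parse_faq := by
  intro md _
  exact pvMain ((PySem.Str.split? md "\n").getD [])
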